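-- pv_equiv track=rewrite | github.com/aayobam/passenger-ticket | sumah_solution.py | det_total_price
-- ===== SOURCE A (Python) =====
-- general_ticket_price = 100
--
-- children_under_3_price = 0
--
-- def det_total_price(passenger_ages = []):
--     total_price = 0
--
--     for age in passenger_ages:
--         if age < 0:
--             total_price += 0
--         elif age <= 3:
--             total_price += children_under_3_price
--         else:
--             total_price += general_ticket_price
--
--     return total_price
-- ===== SOURCE B (Python) =====
-- general_ticket_price = 100
--
-- children_under_3_price = 0
--
-- def _ticket_price(age):
--     if age < 0:
--         return 0
--     if age <= 3:
--         return children_under_3_price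
--     return general_ticket_price
--
-- def det_total_price(passenger_ages = []):
--     # Stage 1: group passengers into a frequency dict age -> number of passengers.
--     counts = {}
--     for age in passenger_ages:
--         counts[age] = counts.get(age, 0) + 1
--     # Stage 2: price each DISTINCT age once, weighted by its multiplicity.
--     return sum(_ticket_price(age) * n for age, n in counts.items())
-- ===== Notes on version B (the rewrite author's own statement) =====
-- stated objective: alternative
-- what changed: Instead of A's single accumulator pass adding a branch-chosen constant per passenger, B first builds a frequency dictionary (age -> multiplicity) and then prices each distinct age once, summing price(age)*multiplicity over the dict items.
import Mathlib
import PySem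

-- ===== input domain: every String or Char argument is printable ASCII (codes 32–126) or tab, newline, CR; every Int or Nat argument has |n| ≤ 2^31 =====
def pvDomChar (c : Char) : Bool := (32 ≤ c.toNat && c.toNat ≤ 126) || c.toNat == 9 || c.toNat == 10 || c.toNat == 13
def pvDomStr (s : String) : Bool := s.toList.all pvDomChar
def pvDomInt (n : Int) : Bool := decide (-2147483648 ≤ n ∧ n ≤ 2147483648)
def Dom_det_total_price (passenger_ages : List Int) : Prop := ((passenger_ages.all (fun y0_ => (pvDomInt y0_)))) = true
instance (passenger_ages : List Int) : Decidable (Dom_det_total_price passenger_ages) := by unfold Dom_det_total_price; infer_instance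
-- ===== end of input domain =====

-- B groups ages into a frequency dict and prices each distinct age once, weighted by multiplicity; alternative decomposition, same O(n).

def pvGeneralTicketPrice : Int := 100
def pvChildrenUnder3Price : Int := 0

-- ===== PORT A =====
def det_total_price (passenger_ages : List Int) : Int :=
  passenger_ages.foldl
    (fun total_price age =>
      if age < 0 then total_price + 0
      else if age ≤ 3 then total_price + pvChildrenUnder3Price
      else total_price + pvGeneralTicketPrice)
    0

-- ===== PORT B =====
def pvTicketPrice (age : Int) : Int :=
  if age < 0 then 0
  else if age ≤ 3 then pvChildrenUnder3Price
  else pvGeneralTicketPrice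

def det_total_price_alt (passenger_ages : List Int) : Int :=
  let counts : PySem.Dict Int Int :=
    passenger_ages.foldl (fun d age => d.insert age (d.getD age 0 + 1)) PySem.Dict.empty
  (counts.items.map (fun p => pvTicketPrice p.1 * p.2)).sum

-- ===== PRECONDITION & SPEC =====
def Spec_det_total_price (passenger_ages : List Int) (out : Int) : Prop := out = det_total_price_alt passenger_ages
instance (passenger_ages : List Int) (out : Int) : Decidable (Spec_det_total_price passenger_ages out) := by unfold Spec_det_total_price; infer_instance

-- ===== CLAIM (what is proved, stated in full; the proofs are below) =====
def Claim_equal_det_total_price : Prop := ∀ (passenger_ages : List Int), Dom_det_total_price passenger_ages → Spec_det_total_price passenger_ages (det_total_price passenger_ages)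

-- ===== LEMMAS AND PROOFS =====
-- A's fold is the plain per-passenger sum of prices.
theorem det_total_price_foldl (xs : List Int) (acc : Int) :
    xs.foldl
      (fun total_price age =>
        if age < 0 then total_price + 0
        else if age ≤ 3 then total_price + pvChildrenUnder3Price
        else total_price + pvGeneralTicketPrice)
      acc = acc + (xs.map pvTicketPrice).sum := by
  induction xs generalizing acc with
  | nil => simp
  | cons x xs ih =>
    simp only [List.foldl_cons, List.map_cons, List.sum_cons, ih, pvTicketPrice]
    split_ifs <;> ring

-- indicator sum over a nodup list picks out the single matching key
theorem sum_map_ite (dd : List Int) (x : Int) (f : Int → Int)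
    (hnd : dd.Nodup) (hx : x ∈ dd) :
    (dd.map (fun k => if k = x then f k else 0)).sum = f x := by
  induction dd with
  | nil => cases hx
  | cons d dd ih =>
    rcases List.nodup_cons.mp hnd with ⟨hd, hnd'⟩
    rcases List.mem_cons.mp hx with h | h
    · subst h
      have : (dd.map (fun k => if k = x then f k else 0)).sum = 0 := by
        apply List.sum_eq_zero
        intro y hy
        rcases List.mem_map.mp hy with ⟨k, hk, hky⟩
        have : k ≠ x := fun h => hd (h ▸ hk)
        simp [← hky, this]
      simp [this]
    · have hdx : d ≠ x := by rintro rfl; exact hd h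
      simp [hdx, ih hnd' h]

-- weighted sum over any nodup superset of xs's elements equals the per-element sum
theorem sum_weighted (dd : List Int) (hnd : dd.Nodup) :
    ∀ xs : List Int, (∀ x ∈ xs, x ∈ dd) →
      (dd.map (fun k => pvTicketPrice k * (xs.count k : Int))).sum = (xs.map pvTicketPrice).sum := by
  intro xs
  induction xs with
  | nil => simp
  | cons x xs ih =>
    intro hcov
    have hx : x ∈ dd := hcov x (List.mem_cons_self ..)
    have hsplit :
        (dd.map (fun k => pvTicketPrice k * (((x :: xs).count k : Nat) : Int))).sum
          = (dd.map (fun k => pvTicketPrice k * (xs.count k : Int))).sum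
            + (dd.map (fun k => if k = x then pvTicketPrice k else 0)).sum := by
      rw [← List.sum_map_add]
      apply congrArg
      apply List.map_congr_left
      intro k hk
      by_cases hkx : k = x
      · subst hkx
        simp [List.count_cons_self]
        ring
      · have : x ≠ k := fun h => hkx h.symm
        simp [List.count_cons_of_ne this, hkx]
    rw [hsplit, ih (fun y hy => hcov y (List.mem_cons_of_mem _ hy)),
        sum_map_ite dd x pvTicketPrice hnd hx]
    simp [add_comm]

-- ===== VERDICT (by name: the statement is the Claim_ definition above) =====
theorem det_total_price_spec : Claim_equal_det_total_price := by
  intro xs _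
  show det_total_price xs = det_total_price_alt xs
  unfold det_total_price det_total_price_alt
  simp only []
  rw [det_total_price_foldl, PySem.Dict.foldl_insert_getD_add_one_eq_counter,
      PySem.Dict.items_counter]
  rw [List.map_map]
  have h := sum_weighted (PySem.Set.ofList xs) (PySem.Set.nodup_ofList xs) xs
      (fun x hx => (PySem.Set.mem_ofList xs x).mpr hx)
  simp only [Function.comp_def]
  rw [h]
  ring
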